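-- pv_equiv track=rewrite | github.com/8Dionysus/aoa-stats | src/aoa_stats_builder/receipt_abi.py | find_supersedes_cycle_nodes
-- ===== SOURCE A (Python) =====
-- def find_supersedes_cycle_nodes(supersedes_by_id: dict[str, str]) -> set[str]:
--     cycle_nodes: set[str] = set()
--     seen_done: set[str] = set()
--
--     for start in supersedes_by_id:
--         if start in seen_done:
--             continue
--         order: list[str] = []
--         positions: dict[str, int] = {}
--         current = start
--         while current in supersedes_by_id:
--             if current in seen_done:
--                 break
--             if current in positions:
--                 cycle_nodes.update(order[positions[current] :])
--                 break
--             positions[current] = len(order)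
--             order.append(current)
--             current = supersedes_by_id[current]
--         seen_done.update(order)
--
--     return cycle_nodes
-- ===== SOURCE B (Python) =====
-- def find_supersedes_cycle_nodes(supersedes_by_id: dict[str, str]) -> set[str]:
--     n = len(supersedes_by_id)
--
--     def on_cycle(u: str) -> bool:
--         # brute force: does following supersedes links from u come back to u within n steps?
--         cur = u
--         for _ in range(n):
--             if cur not in supersedes_by_id:
--                 return False
--             cur = supersedes_by_id[cur]
--             if cur == u:
--                 return True
--         return False
--
--     cycle_nodes: set[str] = set()
--     for start in supersedes_by_id:
--         cur = start
--         while cur in supersedes_by_id and not on_cycle(cur):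
--             cur = supersedes_by_id[cur]
--         if cur in supersedes_by_id and cur not in cycle_nodes:
--             node = cur
--             while True:
--                 cycle_nodes.add(node)
--                 node = supersedes_by_id[node]
--                 if node == cur:
--                     break
--     return cycle_nodes
-- ===== Notes on version B (the rewrite author's own statement) =====
-- stated objective: alternative
-- what changed: A detects cycles with one memoized pass (a positions dict plus order list per walk and a global seen_done set, slicing the recorded path on self-collision); B has no memoization at all: a brute-force predicate on_cycle(u) that simply follows links from u and asks whether they return to u within n steps, and a plain scan that walks from each key to its first on_cycle node and emits that cycle once.
import Mathlib
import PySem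

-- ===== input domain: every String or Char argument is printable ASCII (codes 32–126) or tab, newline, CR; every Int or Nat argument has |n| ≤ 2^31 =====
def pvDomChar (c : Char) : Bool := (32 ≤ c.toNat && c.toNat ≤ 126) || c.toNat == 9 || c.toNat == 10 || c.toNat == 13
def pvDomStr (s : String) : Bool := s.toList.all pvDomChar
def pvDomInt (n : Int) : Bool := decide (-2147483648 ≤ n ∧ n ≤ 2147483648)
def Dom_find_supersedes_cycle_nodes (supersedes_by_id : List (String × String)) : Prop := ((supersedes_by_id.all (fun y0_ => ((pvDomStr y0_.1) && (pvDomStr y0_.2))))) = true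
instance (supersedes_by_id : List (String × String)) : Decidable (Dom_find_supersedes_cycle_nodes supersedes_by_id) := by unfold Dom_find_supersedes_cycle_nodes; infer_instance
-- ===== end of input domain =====

-- B drops A's memoized bookkeeping (positions dict, order list, seen_done set) for a
-- brute-force predicate "does u return to itself within n steps" plus a plain emission
-- scan (objective: alternative; B is O(n^2) where A is O(n)).

-- ===== PORT A =====
-- inner 'while current in supersedes_by_id' loop of A; fuel = len(keys)+1 bounds the walk,
-- which visits pairwise distinct keys before it breaks, so the fuel is never exhausted
def pvWalkA (d : PySem.Dict String String) (cycle seen : PySem.Set String)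
    (positions : PySem.Dict String Int) (order : List String) (current : String) :
    Nat → PySem.Set String × List String
  | 0 => (cycle, order)
  | fuel+1 =>
    if d.contains current then
      if PySem.Set.contains seen current then (cycle, order)
      else if positions.contains current then
        -- cycle_nodes.update(order[positions[current]:])  (positions[current] is present here)
        (PySem.Set.update cycle (PySem.List.slice order (some (positions.getD current 0)) none), order)
      else
        pvWalkA d cycle seen (positions.insert current (order.length : Int)) (order ++ [current])
          (d.getD current "") fuel
    else (cycle, order)

def find_supersedes_cycle_nodes (supersedes_by_id : List (String × String)) : List String :=
  let d := PySem.Dict.ofList supersedes_by_id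
  let ks := d.keys
  (ks.foldl (fun (st : PySem.Set String × PySem.Set String) start =>
      if PySem.Set.contains st.2 start then st
      else
        let r := pvWalkA d st.1 st.2 PySem.Dict.empty [] start (ks.length + 1)
        (r.1, PySem.Set.update st.2 r.2))
    (PySem.Set.empty, PySem.Set.empty)).1

-- ===== PORT B =====
-- B's helper on_cycle(u): 'for _ in range(n)' is the fuel; exact transliteration
def pvOnCycle (d : PySem.Dict String String) (u : String) (cur : String) : Nat → Bool
  | 0 => false
  | fuel+1 =>
    if d.contains cur then
      let nxt := d.getD cur ""
      if nxt == u then true else pvOnCycle d u nxt fuel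
    else false

-- B's 'while cur in supersedes_by_id and not on_cycle(cur)' loop; the nodes stepped
-- through are pairwise distinct keys, so fuel n+1 is never exhausted
def pvSeekB (d : PySem.Dict String String) (n : Nat) (cur : String) : Nat → String
  | 0 => cur
  | fuel+1 =>
    if d.contains cur && !(pvOnCycle d cur cur n) then pvSeekB d n (d.getD cur "") fuel
    else cur

-- B's emission loop: walk around the cycle once ('while True: … break'); length ≤ n
def pvEmitB (d : PySem.Dict String String) (head : String) (cycle : PySem.Set String)
    (node : String) : Nat → PySem.Set String
  | 0 => cycle
  | fuel+1 =>
    let cycle' := PySem.Set.add cycle node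
    let nxt := d.getD node ""
    if nxt == head then cycle' else pvEmitB d head cycle' nxt fuel

def find_supersedes_cycle_nodes_alt (supersedes_by_id : List (String × String)) : List String :=
  let d := PySem.Dict.ofList supersedes_by_id
  let n := d.keys.length
  d.keys.foldl (fun (cy : PySem.Set String) start =>
      let cur := pvSeekB d n start (n + 1)
      if d.contains cur && !(PySem.Set.contains cy cur) then
        pvEmitB d cur cy cur (n + 1)
      else cy)
    PySem.Set.empty

-- ===== PRECONDITION & SPEC =====
def Spec_find_supersedes_cycle_nodes (supersedes_by_id : List (String × String)) (out : List String) : Prop := out = find_supersedes_cycle_nodes_alt supersedes_by_id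
instance (supersedes_by_id : List (String × String)) (out : List String) : Decidable (Spec_find_supersedes_cycle_nodes supersedes_by_id out) := by unfold Spec_find_supersedes_cycle_nodes; infer_instance

-- ===== CLAIM (what is proved, stated in full; the proofs are below) =====
def Claim_equal_find_supersedes_cycle_nodes : Prop := ∀ (supersedes_by_id : List (String × String)), Dom_find_supersedes_cycle_nodes supersedes_by_id → Spec_find_supersedes_cycle_nodes supersedes_by_id (find_supersedes_cycle_nodes supersedes_by_id)

-- ===== LEMMAS AND PROOFS =====

-- the step function of the supersedes map, and the successor relation (proof-only notions)
def pvF (d : PySem.Dict String String) (x : String) : String := d.getD x ""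
def pvStep (d : PySem.Dict String String) (a b : String) : Prop := pvF d a = b
-- x lies on a cycle of keys
def pvCyc (d : PySem.Dict String String) (x : String) : Prop :=
  ∃ k, 1 ≤ k ∧ (pvF d)^[k] x = x ∧ ∀ j, d.contains ((pvF d)^[j] x) = true

lemma pv_set_contains_iff (s : PySem.Set String) (x : String) :
    PySem.Set.contains s x = true ↔ x ∈ s := by
  simp [PySem.Set.contains]

lemma pv_iterate_period_mul (d : PySem.Dict String String) (k : Nat) (x : String)
    (h : (pvF d)^[k] x = x) : ∀ c, (pvF d)^[k * c] x = x := by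
  intro c
  induction c with
  | zero => simp
  | succ c ih =>
    have : k * (c + 1) = k + k * c := by ring
    rw [this, Function.iterate_add_apply, ih, h]

lemma pv_onc_sound (d : PySem.Dict String String) (u : String) :
    ∀ (F : Nat) (c : String), pvOnCycle d u c F = true →
      ∃ k, 1 ≤ k ∧ k ≤ F ∧ (pvF d)^[k] c = u ∧ ∀ j < k, d.contains ((pvF d)^[j] c) = true := by
  intro F
  induction F with
  | zero => intro c h; simp [pvOnCycle] at h
  | succ F ih =>
    intro c h
    simp only [pvOnCycle] at h
    by_cases hc : d.contains c = true
    · rw [if_pos hc] at h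
      by_cases hu : (d.getD c "" == u) = true
      · refine ⟨1, le_refl _, by omega, ?_, ?_⟩
        · simpa [pvF] using eq_of_beq hu
        · intro j hj
          interval_cases j
          simpa using hc
      · rw [if_neg hu] at h
        obtain ⟨k, hk1, hkF, hper, hcont⟩ := ih (d.getD c "") h
        refine ⟨k + 1, by omega, by omega, ?_, ?_⟩
        · rw [Function.iterate_succ_apply]; exact hper
        · intro j hj
          cases j with
          | zero => simpa using hc
          | succ j =>
            rw [Function.iterate_succ_apply]
            exact hcont j (by omega)
    · rw [if_neg hc] at h; cases h

lemma pv_onc_complete (d : PySem.Dict String String) (u : String) :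
    ∀ (F k : Nat) (c : String), 1 ≤ k → k ≤ F → (pvF d)^[k] c = u →
      (∀ j < k, d.contains ((pvF d)^[j] c) = true) → pvOnCycle d u c F = true := by
  intro F
  induction F with
  | zero => intro k c hk hkF _ _; omega
  | succ F ih =>
    intro k c hk hkF hper hcont
    have hc : d.contains c = true := by simpa using hcont 0 (by omega)
    simp only [pvOnCycle, if_pos hc]
    by_cases hu : (d.getD c "" == u) = true
    · rw [if_pos hu]
    · rw [if_neg hu]
      obtain ⟨k', rfl⟩ : ∃ k', k = k' + 1 := ⟨k - 1, by omega⟩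
      have hk' : 1 ≤ k' := by
        by_contra h
        have : k' = 0 := by omega
        subst this
        exact hu (beq_iff_eq.mpr (by simpa [pvF] using hper))
      refine ih k' (d.getD c "") hk' (by omega) ?_ ?_
      · show (pvF d)^[k'] (pvF d c) = u
        rw [← Function.iterate_succ_apply]
        exact hper
      · intro j hj
        show d.contains ((pvF d)^[j] (pvF d c)) = true
        rw [← Function.iterate_succ_apply]
        exact hcont (j + 1) (by omega)

lemma pv_cyc_of_onc (d : PySem.Dict String String) (x : String) (F : Nat)
    (h : pvOnCycle d x x F = true) : pvCyc d x := by
  obtain ⟨k, hk1, _, hper, hcont⟩ := pv_onc_sound d x F x h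
  refine ⟨k, hk1, hper, ?_⟩
  intro j
  have hsplit : j % k + k * (j / k) = j := Nat.mod_add_div j k
  have : (pvF d)^[j] x = (pvF d)^[j % k] x := by
    conv_lhs => rw [← hsplit]
    rw [Function.iterate_add_apply, pv_iterate_period_mul d k x hper]
  rw [this]
  exact hcont _ (Nat.mod_lt _ (by omega))

-- from a collision f^[a] x = f^[b] x (a < b) on a periodic point, a short period b - a
lemma pv_short_period (d : PySem.Dict String String) (x : String) (k a b : Nat)
    (hk1 : 1 ≤ k) (hper : (pvF d)^[k] x = x) (hab : a < b)
    (heq : (pvF d)^[a] x = (pvF d)^[b] x) : (pvF d)^[b - a] x = x := by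
  have hmul : (pvF d)^[k * a] x = x := pv_iterate_period_mul d k x hper a
  have hle : a ≤ k * a := Nat.le_mul_of_pos_left a (by omega)
  have e2 : b - a + k * a = k * a - a + b := by omega
  calc (pvF d)^[b - a] x
      = (pvF d)^[b - a] ((pvF d)^[k * a] x) := by rw [hmul]
    _ = (pvF d)^[b - a + k * a] x := (Function.iterate_add_apply _ _ _ _).symm
    _ = (pvF d)^[k * a - a + b] x := by rw [e2]
    _ = (pvF d)^[k * a - a] ((pvF d)^[b] x) := Function.iterate_add_apply _ _ _ _
    _ = (pvF d)^[k * a - a] ((pvF d)^[a] x) := by rw [heq]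
    _ = (pvF d)^[k * a - a + a] x := (Function.iterate_add_apply _ _ _ _).symm
    _ = (pvF d)^[k * a] x := by rw [Nat.sub_add_cancel hle]
    _ = x := hmul

lemma pv_onc_of_cyc (d : PySem.Dict String String) (x : String)
    (h : pvCyc d x) : pvOnCycle d x x d.keys.length = true := by
  obtain ⟨k, hk1, hper, hcont⟩ := h
  set n := d.keys.length with hn
  -- pigeonhole: among the n+1 iterates f^[0..n] x (all keys) two coincide
  have hmaps : Set.MapsTo (fun a => (pvF d)^[a] x) ↑(Finset.range (n + 1)) ↑(d.keys.toFinset) := by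
    intro a _
    simp only [List.coe_toFinset, Set.mem_setOf_eq]
    exact (PySem.Dict.contains_iff_mem_keys d _).mp (hcont a)
  have hcard : (d.keys.toFinset).card < (Finset.range (n + 1)).card := by
    rw [Finset.card_range]
    have := List.toFinset_card_le d.keys
    omega
  obtain ⟨a, ha, b, hb, hab, heq⟩ := Finset.exists_ne_map_eq_of_card_lt_of_maps_to hcard hmaps
  simp only [Finset.mem_range] at ha hb
  have key : ∃ t, 1 ≤ t ∧ t ≤ n ∧ (pvF d)^[t] x = x := by
    rcases lt_or_gt_of_ne hab with hlt | hlt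
    · exact ⟨b - a, by omega, by omega, pv_short_period d x k a b hk1 hper hlt heq⟩
    · exact ⟨a - b, by omega, by omega, pv_short_period d x k b a hk1 hper hlt heq.symm⟩
  obtain ⟨t, ht1, htn, htper⟩ := key
  exact pv_onc_complete d x n t x ht1 htn htper (fun j _ => hcont j)

lemma pv_cyc_shift (d : PySem.Dict String String) (x : String) (m : Nat)
    (h : pvCyc d x) : pvCyc d ((pvF d)^[m] x) := by
  obtain ⟨k, hk1, hper, hcont⟩ := h
  refine ⟨k, hk1, ?_, ?_⟩
  · rw [← Function.iterate_add_apply, Nat.add_comm, Function.iterate_add_apply, hper]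
  · intro j
    rw [← Function.iterate_add_apply]
    exact hcont _

lemma pv_cyc_back (d : PySem.Dict String String) (x : String) (m : Nat)
    (h : pvCyc d x) : ∃ m', (pvF d)^[m'] ((pvF d)^[m] x) = x := by
  obtain ⟨k, hk1, hper, -⟩ := h
  refine ⟨k * m - m, ?_⟩
  have hle : m ≤ k * m := Nat.le_mul_of_pos_left m (by omega)
  rw [← Function.iterate_add_apply]
  have : k * m - m + m = k * m := by omega
  rw [this]
  exact pv_iterate_period_mul d k x hper m

-- determinism: a pvStep-chain is the iterate sequence of its elements
lemma pv_chain_iter (d : PySem.Dict String String) (l : List String)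
    (hch : List.IsChain (pvStep d) l) :
    ∀ (m i : Nat) (x : String), l[i]? = some x → i + m < l.length →
      l[i + m]? = some ((pvF d)^[m] x) := by
  intro m
  induction m with
  | zero => intro i x hx _; simpa using hx
  | succ m ih =>
    intro i x hx hlen
    have hi1 : i + 1 < l.length := by omega
    have hx' : x = l[i]'(by omega) := by
      rw [List.getElem?_eq_some_iff] at hx
      obtain ⟨h, hh⟩ := hx; exact hh.symm
    have hstep : pvStep d (l[i]'(by omega)) (l[i + 1]'hi1) :=
      List.isChain_iff_getElem.mp hch i hi1
    have hfx : l[i + 1]? = some (pvF d x) := by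
      rw [List.getElem?_eq_getElem hi1]
      rw [hx', hstep]
    have := ih (i + 1) (pvF d x) hfx (by omega)
    have hidx : i + 1 + m = i + (m + 1) := by omega
    rw [hidx] at this
    rw [this, Function.iterate_succ_apply]

lemma pv_seek_stop (d : PySem.Dict String String) (n : Nat) (c : String) (F : Nat)
    (h : d.contains c = false ∨ pvOnCycle d c c n = true) (hF : 1 ≤ F) :
    pvSeekB d n c F = c := by
  obtain ⟨F, rfl⟩ : ∃ F', F = F' + 1 := ⟨F - 1, by omega⟩
  rcases h with h | h <;> simp [pvSeekB, h]

lemma pv_seek_eval (d : PySem.Dict String String) (n : Nat) :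
    ∀ (pre : List String) (c : String) (F : Nat),
    pre.length < F → List.IsChain (pvStep d) (pre ++ [c]) →
    (∀ y ∈ pre, d.contains y = true ∧ pvOnCycle d y y n = false) →
    (d.contains c = false ∨ pvOnCycle d c c n = true) →
    pvSeekB d n (pre.headD c) F = c := by
  intro pre
  induction pre with
  | nil => intro c F hF _ _ hstop; exact pv_seek_stop d n c F hstop (by omega)
  | cons y ys ih =>
    intro c F hF hch hns hstop
    obtain ⟨F, rfl⟩ : ∃ F', F = F' + 1 := ⟨F - 1, by omega⟩
    obtain ⟨hy, hyc⟩ := hns y (by simp)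
    have hstep : pvSeekB d n y (F + 1) = pvSeekB d n (d.getD y "") F := by
      simp [pvSeekB, hy, hyc]
    rw [List.headD_cons, hstep]
    cases ys with
    | nil =>
      have hyc' : pvStep d y c ∧ List.IsChain (pvStep d) [c] := by
        exact List.isChain_cons_cons.mp (by simpa using hch)
      rw [show d.getD y "" = c from hyc'.1]
      exact pv_seek_stop d n c F hstop (by simpa using hF)
    | cons z zs =>
      have hyz : pvStep d y z ∧ List.IsChain (pvStep d) ((z :: zs) ++ [c]) := by
        exact List.isChain_cons_cons.mp (by simpa using hch)
      rw [show d.getD y "" = z from hyz.1]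
      have hlen : zs.length + 1 < F := by simp only [List.length_cons] at hF; omega
      have := ih c F hlen hyz.2 (fun x hx => hns x (by simp [hx])) hstop
      simpa using this

-- B's emission loop walks the cycle once and adds exactly the suffix it walks
lemma pvEmit_eq (d : PySem.Dict String String) (c : String) :
    ∀ (suffix : List String) (node : String) (cycle : PySem.Set String) (fuel : Nat),
      suffix.length < fuel →
      List.IsChain (pvStep d) (node :: (suffix ++ [c])) →
      c ∉ suffix →
      pvEmitB d c cycle node fuel = List.foldl PySem.Set.add cycle (node :: suffix) := by
  intro suffix
  induction suffix with
  | nil =>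
    intro node cycle fuel hf hch _hc
    obtain ⟨f, rfl⟩ : ∃ f, fuel = f + 1 := ⟨fuel - 1, by omega⟩
    simp only [List.nil_append, List.isChain_cons_cons] at hch
    have h1 : (d.getD node "" == c) = true := beq_iff_eq.mpr hch.1
    simp [pvEmitB, h1]
  | cons r rs ih =>
    intro node cycle fuel hf hch hc
    obtain ⟨f, rfl⟩ : ∃ f, fuel = f + 1 := ⟨fuel - 1, by omega⟩
    simp only [List.cons_append, List.isChain_cons_cons] at hch
    have hrc : (r == c) = false := by
      simp only [List.mem_cons, not_or] at hc
      exact beq_false_of_ne (fun h => hc.1 h.symm)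
    have hstep : d.getD node "" = r := hch.1
    have : pvEmitB d c cycle node (f + 1)
        = pvEmitB d c (PySem.Set.add cycle node) r f := by
      simp [pvEmitB, hstep, hrc]
    rw [this, ih r (PySem.Set.add cycle node) f (by simpa using hf) hch.2
      (by simp only [List.mem_cons, not_or] at hc; exact hc.2)]
    simp

lemma pv_chain_glue (d : PySem.Dict String String) (l1 : List String) (m : String)
    (l2 : List String) (h1 : List.IsChain (pvStep d) (l1 ++ [m]))
    (h2 : List.IsChain (pvStep d) (m :: l2)) :
    List.IsChain (pvStep d) (l1 ++ m :: l2) := by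
  cases l2 with
  | nil => simpa using h1
  | cons z zs =>
    have hz := List.isChain_cons_cons.mp h2
    have happ := List.IsChain.append h1 hz.2 ?_
    · simpa [List.append_assoc] using happ
    · intro x hx y hy
      rw [List.getLast?_concat] at hx
      simp only [List.head?_cons, Option.mem_some_iff] at hx hy
      rw [← hx, ← hy]; exact hz.1

lemma pv_contains_update (s : PySem.Set String) (l : List String) (x : String) :
    PySem.Set.contains (PySem.Set.update s l) x
      = (PySem.Set.contains s x || decide (x ∈ l)) := by
  rw [Bool.eq_iff_iff]
  simp [PySem.Set.mem_update]

lemma pv_pos_mem (positions : PySem.Dict String Int) (order : List String)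
    (hP : ∀ x, positions.get? x = (PySem.List.index? order x).map (fun n => (n : Int)))
    (x : String) : positions.contains x = true ↔ x ∈ order := by
  rw [PySem.Dict.contains_eq_isSome_get?, hP, PySem.List.index?_eq_idxOf?]
  rw [← List.isSome_idxOf? (l := order) (a := x)]
  cases List.idxOf? x order <;> simp

-- characterization of A's inner walk: it extends `order` by a fresh chain `tail`
-- and stops either off the keys, on a seen node, or on its own path (emitting a suffix)
lemma pv_walkA_spec (d : PySem.Dict String String) :
  ∀ (fuel : Nat) (cyc seen : PySem.Set String) (positions : PySem.Dict String Int)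
    (order : List String) (current : String),
    (∀ x, positions.get? x = (PySem.List.index? order x).map (fun n => (n : Int))) →
    List.IsChain (pvStep d) (order ++ [current]) →
    order.Nodup →
    (∀ x ∈ order, d.contains x = true) →
    (∀ x ∈ order, PySem.Set.contains seen x = false) →
    ((d.keys.filter (fun k => !(PySem.Set.contains seen k) && !(decide (k ∈ order)))).length < fuel) →
    ∃ (tail : List String) (cur' : String) (ext : List String),
      (order ++ tail) ++ [cur'] = order ++ current :: ext ∧
      List.IsChain (pvStep d) ((order ++ tail) ++ [cur']) ∧
      (order ++ tail).Nodup ∧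
      (∀ x ∈ order ++ tail, d.contains x = true) ∧
      (∀ x ∈ tail, PySem.Set.contains seen x = false) ∧
      ( (d.contains cur' = false ∧
           pvWalkA d cyc seen positions order current fuel = (cyc, order ++ tail)) ∨
        (d.contains cur' = true ∧ PySem.Set.contains seen cur' = true ∧
           pvWalkA d cyc seen positions order current fuel = (cyc, order ++ tail)) ∨
        (∃ p, PySem.List.index? (order ++ tail) cur' = some p ∧
           pvWalkA d cyc seen positions order current fuel
             = (PySem.Set.update cyc ((order ++ tail).drop p), order ++ tail)) ) := by
  intro fuel
  induction fuel with
  | zero =>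
    intro cyc seen positions order current _ _ _ _ _ hfuel
    exact absurd hfuel (Nat.not_lt_zero _)
  | succ f ih =>
    intro cyc seen positions order current hP hch hnd hkeys hfresh hfuel
    have hposmem := pv_pos_mem positions order hP
    cases hd : d.contains current with
    | false =>
      refine ⟨[], current, [], by simp, by simpa using hch, by simpa using hnd,
        by simpa using hkeys, by simp, Or.inl ⟨hd, ?_⟩⟩
      simp [pvWalkA, hd]
    | true =>
      cases hs : PySem.Set.contains seen current with
      | true =>
        refine ⟨[], current, [], by simp, by simpa using hch, by simpa using hnd,
          by simpa using hkeys, by simp, Or.inr (Or.inl ⟨hd, hs, ?_⟩)⟩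
        simp only [pvWalkA, hd, hs]; simp
      | false =>
        cases hp : positions.contains current with
        | true =>
          obtain ⟨k, hk⟩ : ∃ k, PySem.List.index? order current = some k := by
            rw [PySem.Dict.contains_eq_isSome_get?, hP current] at hp
            cases hidx : PySem.List.index? order current
            · rw [hidx] at hp; simp at hp
            · exact ⟨_, rfl⟩
          have hgetD : positions.getD current 0 = (k : Int) := by
            rw [PySem.Dict.getD_eq_get?_getD, hP current, hk]; rfl
          refine ⟨[], current, [], by simp, by simpa using hch, by simpa using hnd,
            by simpa using hkeys, by simp, Or.inr (Or.inr ⟨k, by simpa using hk, ?_⟩)⟩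
          simp only [pvWalkA, hd, hs, hp, hgetD, PySem.List.slice_from_natCast]
          simp
        | false =>
          have hcur_notin : current ∉ order := fun h => by
            rw [(hposmem current).mpr h] at hp; cases hp
          have hmemkeys : current ∈ d.keys := (PySem.Dict.contains_iff_mem_keys d current).mp hd
          -- invariants for the extended walk
          have hP' : ∀ x, (positions.insert current (order.length : Int)).get? x
              = (PySem.List.index? (order ++ [current]) x).map (fun n => (n : Int)) := by
            intro x
            by_cases hx : x = current
            · subst hx
              rw [PySem.Dict.get?_insert_self,
                PySem.List.index?_append_singleton_self order _ hcur_notin]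
              rfl
            · rw [PySem.Dict.get?_insert_of_ne _ _ hx]
              by_cases hmem : x ∈ order
              · rw [hP x, PySem.List.index?_append_of_mem _ hmem]
              · rw [hP x, (PySem.List.index?_eq_none_iff _ _).mpr hmem,
                  (PySem.List.index?_eq_none_iff _ _).mpr (by simp [hx, hmem])]
          have hch' : List.IsChain (pvStep d) ((order ++ [current]) ++ [d.getD current ""]) := by
            refine List.IsChain.append hch (List.IsChain.singleton _) ?_
            intro x hx y hy
            rw [List.getLast?_concat] at hx
            simp only [List.head?_cons, Option.mem_some_iff] at hx hy
            rw [← hx, ← hy]; rfl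
          have hnd' : (order ++ [current]).Nodup :=
            List.Nodup.append hnd (List.nodup_singleton current)
              (by intro a ha hb; rw [List.mem_singleton] at hb; exact hcur_notin (hb ▸ ha))
          have hkeys' : ∀ x ∈ order ++ [current], d.contains x = true := by
            intro x hx
            rcases List.mem_append.mp hx with h | h
            · exact hkeys x h
            · simp only [List.mem_singleton] at h; rw [h]; exact hd
          have hfresh' : ∀ x ∈ order ++ [current], PySem.Set.contains seen x = false := by
            intro x hx
            rcases List.mem_append.mp hx with h | h
            · exact hfresh x h
            · simp only [List.mem_singleton] at h; rw [h]; exact hs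
          have hfuel' : ((d.keys.filter (fun k => !(PySem.Set.contains seen k)
              && !(decide (k ∈ order ++ [current])))).length) < f := by
            have hpred : (fun k => !(PySem.Set.contains seen k) && !(decide (k ∈ order ++ [current])))
                = fun k => !(k == current) && (!(PySem.Set.contains seen k) && !(decide (k ∈ order))) := by
              funext k
              by_cases h1 : k = current
              · subst h1; simp
              · simp [h1, List.mem_append, beq_false_of_ne h1]
            have hsplit : d.keys.filter (fun k => !(k == current) && (!(PySem.Set.contains seen k) && !(decide (k ∈ order))))
                = (d.keys.filter (fun k => !(PySem.Set.contains seen k) && !(decide (k ∈ order)))).filter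
                    (fun k => !(k == current)) := by
              rw [List.filter_filter]
            have hlt : ((d.keys.filter (fun k => !(PySem.Set.contains seen k) && !(decide (k ∈ order)))).filter
                  (fun k => !(k == current))).length
                < (d.keys.filter (fun k => !(PySem.Set.contains seen k) && !(decide (k ∈ order)))).length := by
              apply List.length_filter_lt_length_iff_exists.mpr
              have hnotmem : current ∉ seen := fun hmem => by
                rw [(pv_set_contains_iff seen current).mpr hmem] at hs; cases hs
              exact ⟨current, List.mem_filter.mpr ⟨hmemkeys, by simp [hnotmem, hcur_notin]⟩, by simp⟩
            rw [hpred, hsplit]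
            omega
          obtain ⟨tail', cur', ext', hext, hch2, hnd2, hkeys2, hfresh2, hout⟩ :=
            ih cyc seen (positions.insert current (order.length : Int)) (order ++ [current])
              (d.getD current "") hP' hch' hnd' hkeys' hfresh' hfuel'
          have hassoc : (order ++ [current]) ++ tail' = order ++ (current :: tail') := by
            simp
          have hAstep : pvWalkA d cyc seen positions order current (f + 1)
              = pvWalkA d cyc seen (positions.insert current (order.length : Int))
                  (order ++ [current]) (d.getD current "") f := by
            simp only [pvWalkA, hd, hs, hp]; simp
          refine ⟨current :: tail', cur', d.getD current "" :: ext', ?_, ?_, ?_, ?_, ?_, ?_⟩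
          · rw [← hassoc, hext]; simp
          · rw [← hassoc]; exact hch2
          · rw [← hassoc]; exact hnd2
          · rw [← hassoc]; exact hkeys2
          · intro x hx
            rcases List.mem_cons.mp hx with h | h
            · rw [h]; exact hs
            · exact hfresh2 x h
          · rw [← hassoc, hAstep]
            rcases hout with h | h | h
            · exact Or.inl h
            · exact Or.inr (Or.inl h)
            · exact Or.inr (Or.inr h)

-- a seek stop point of B's outer while loop
def pvStopP (d : PySem.Dict String String) (c : String) : Prop :=
  d.contains c = false ∨ pvOnCycle d c c d.keys.length = true
-- a stop point whose guard cannot fire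
def pvGoodStop (d : PySem.Dict String String) (cyc : PySem.Set String) (c : String) : Prop :=
  d.contains c = false ∨ c ∈ cyc
-- B's walk from x reaches a stop at which it emits nothing
def pvGoodSeek (d : PySem.Dict String String) (seen cyc : PySem.Set String) (x : String) : Prop :=
  (pvStopP d x ∧ pvGoodStop d cyc x) ∨
  ∃ pre c, List.IsChain (pvStep d) ((x :: pre) ++ [c]) ∧
    (∀ y ∈ x :: pre, d.contains y = true ∧ pvOnCycle d y y d.keys.length = false) ∧
    (∀ y ∈ x :: pre, PySem.Set.contains seen y = true) ∧
    (x :: pre).Nodup ∧ pvStopP d c ∧ pvGoodStop d cyc c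

lemma pv_goodSeek_mono (d : PySem.Dict String String) (seen seen' cyc cyc' : PySem.Set String)
    (x : String) (hs : ∀ y, PySem.Set.contains seen y = true → PySem.Set.contains seen' y = true)
    (hc : ∀ y ∈ cyc, y ∈ cyc') (h : pvGoodSeek d seen cyc x) : pvGoodSeek d seen' cyc' x := by
  rcases h with ⟨h1, h2⟩ | ⟨pre, c, hch, hns, hseen, hnd, hstop, hgood⟩
  · exact Or.inl ⟨h1, h2.imp id (hc x)⟩
  · exact Or.inr ⟨pre, c, hch, hns, fun y hy => hs y (hseen y hy), hnd, hstop,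
      hgood.imp id (hc c)⟩

lemma pv_nodup_keys_len (d : PySem.Dict String String) (l : List String) (hnd : l.Nodup)
    (hsub : ∀ x ∈ l, d.contains x = true) : l.length ≤ d.keys.length :=
  (List.subperm_of_subset hnd
    (fun x hx => (PySem.Dict.contains_iff_mem_keys d x).mp (hsub x hx))).length_le

-- B's fold step does nothing on a GoodSeek node
lemma pv_no_emit (d : PySem.Dict String String) (cyc seen : PySem.Set String) (x : String)
    (hgs : pvGoodSeek d seen cyc x) :
    (if d.contains (pvSeekB d d.keys.length x (d.keys.length + 1))
        && !(PySem.Set.contains cyc (pvSeekB d d.keys.length x (d.keys.length + 1))) then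
       pvEmitB d (pvSeekB d d.keys.length x (d.keys.length + 1)) cyc
         (pvSeekB d d.keys.length x (d.keys.length + 1)) (d.keys.length + 1)
     else cyc) = cyc := by
  rcases hgs with ⟨h1, h2⟩ | ⟨pre, c, hch, hns, _, hnd, hstop, hgood⟩
  · rw [pv_seek_stop d _ x _ h1 (by omega)]
    rcases h2 with h2 | h2
    · simp [h2]
    · simp only [Bool.and_eq_true, Bool.not_eq_true']
      rw [(pv_set_contains_iff cyc x).mpr h2]
      simp
  · have hlen : (x :: pre).length < d.keys.length + 1 := by
      have := pv_nodup_keys_len d (x :: pre) hnd (fun y hy => (hns y hy).1)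
      omega
    have := pv_seek_eval d d.keys.length (x :: pre) c (d.keys.length + 1) hlen hch hns hstop
    rw [List.headD_cons] at this
    rw [this]
    rcases hgood with h2 | h2
    · simp [h2]
    · simp only [Bool.and_eq_true, Bool.not_eq_true']
      rw [(pv_set_contains_iff cyc c).mpr h2]
      simp

-- a chain from index i reaches the appended stop node in (length - i) steps
lemma pv_chain_last (d : PySem.Dict String String) (tail : List String) (cur' : String)
    (hch : List.IsChain (pvStep d) (tail ++ [cur'])) (i : Nat) (hi : i < tail.length) :
    (pvF d)^[tail.length - i] (tail[i]) = cur' := by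
  have hx : (tail ++ [cur'])[i]? = some tail[i] := by
    rw [List.getElem?_append_left hi, List.getElem?_eq_getElem hi]
  have h := pv_chain_iter d _ hch (tail.length - i) i _ hx (by simp only [List.length_append, List.length_cons, List.length_nil]; omega)
  have hidx : i + (tail.length - i) = tail.length := by omega
  rw [hidx] at h
  have hlast : (tail ++ [cur'])[tail.length]? = some cur' := by
    simp
  rw [hlast] at h
  exact (Option.some_injective _ h).symm

-- a chain connects its own entries
lemma pv_chain_between (d : PySem.Dict String String) (tail : List String) (cur' : String)
    (hch : List.IsChain (pvStep d) (tail ++ [cur'])) (i j : Nat) (hij : i ≤ j)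
    (hj : j < tail.length) :
    (pvF d)^[j - i] (tail[i]'(lt_of_le_of_lt hij hj)) = tail[j] := by
  have hi : i < tail.length := lt_of_le_of_lt hij hj
  have hx : (tail ++ [cur'])[i]? = some (tail[i]'hi) := by
    rw [List.getElem?_append_left hi, List.getElem?_eq_getElem hi]
  have h := pv_chain_iter d _ hch (j - i) i _ hx (by simp only [List.length_append, List.length_cons, List.length_nil]; omega)
  have hidx : i + (j - i) = j := by omega
  rw [hidx] at h
  have hj' : (tail ++ [cur'])[j]? = some tail[j] := by
    rw [List.getElem?_append_left hj, List.getElem?_eq_getElem hj]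
  rw [hj'] at h
  exact (Option.some_injective _ h).symm

-- in the collision case the emitted suffix is closed under the step function
lemma pv_loop_step (d : PySem.Dict String String) (tail : List String) (p : Nat)
    (hp : p < tail.length) (hch : List.IsChain (pvStep d) (tail ++ [tail[p]])) :
    ∀ x ∈ tail.drop p, pvF d x ∈ tail.drop p := by
  intro x hx
  obtain ⟨i, hi, hxe⟩ := List.mem_iff_getElem.mp hx
  rw [List.getElem_drop] at hxe
  have hpi : p + i < tail.length := by
    rw [List.length_drop] at hi; omega
  by_cases hlast : p + i + 1 < tail.length
  · have hstep := List.isChain_iff_getElem.mp hch (p + i)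
      (by simp only [List.length_append, List.length_cons, List.length_nil]; omega)
    rw [List.getElem_append_left hpi, List.getElem_append_left hlast] at hstep
    rw [← hxe, hstep]
    exact List.mem_iff_getElem.mpr ⟨i + 1, by rw [List.length_drop]; omega,
      by rw [List.getElem_drop]; congr 1⟩
  · have hpi' : p + i + 1 = tail.length := by omega
    have hstep := List.isChain_iff_getElem.mp hch (p + i)
      (by simp only [List.length_append, List.length_cons, List.length_nil]; omega)
    rw [List.getElem_append_left hpi] at hstep
    have hr : (tail ++ [tail[p]])[p + i + 1]'(by simp only [List.length_append, List.length_cons, List.length_nil]; omega)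
        = tail[p] := by
      have : p + i + 1 = tail.length + 0 := by omega
      simp [List.getElem_append_right, hpi']
    rw [hr] at hstep
    rw [← hxe, hstep]
    exact List.mem_iff_getElem.mpr ⟨0, by rw [List.length_drop]; omega,
      by rw [List.getElem_drop]; congr 1⟩

lemma pv_loop_orbit (d : PySem.Dict String String) (tail : List String) (p : Nat)
    (hp : p < tail.length) (hch : List.IsChain (pvStep d) (tail ++ [tail[p]])) :
    ∀ (m : Nat) (x : String), x ∈ tail.drop p → (pvF d)^[m] x ∈ tail.drop p := by
  intro m
  induction m with
  | zero => intro x hx; simpa using hx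
  | succ m ih =>
    intro x hx
    rw [Function.iterate_succ_apply]
    exact ih _ (pv_loop_step d tail p hp hch x hx)

lemma pv_loop_cyc (d : PySem.Dict String String) (tail : List String) (p : Nat)
    (hp : p < tail.length) (hch : List.IsChain (pvStep d) (tail ++ [tail[p]]))
    (hkeys : ∀ x ∈ tail, d.contains x = true) :
    ∀ x ∈ tail.drop p, pvCyc d x := by
  intro x hx
  obtain ⟨i, hi, hxe⟩ := List.mem_iff_getElem.mp hx
  rw [List.getElem_drop] at hxe
  have hpi : p + i < tail.length := by rw [List.length_drop] at hi; omega
  refine ⟨tail.length - p, by omega, ?_, ?_⟩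
  · have h1 : (pvF d)^[tail.length - (p + i)] x = tail[p] := by
      rw [← hxe]; exact pv_chain_last d tail _ hch (p + i) hpi
    have h2 : (pvF d)^[i] (tail[p]'hp) = tail[p + i]'hpi := by
      have := pv_chain_between d tail _ hch p (p + i) (by omega) hpi
      simpa using this
    have : (pvF d)^[i + (tail.length - (p + i))] x = tail[p + i]'hpi := by
      rw [Function.iterate_add_apply, h1, h2]
    rw [show tail.length - p = i + (tail.length - (p + i)) by omega, this, hxe]
  · intro j
    have := pv_loop_orbit d tail p hp hch j x hx
    exact hkeys _ (List.drop_subset _ _ this)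

lemma pv_prefix_nocyc_of_loop (d : PySem.Dict String String) (tail : List String) (p : Nat)
    (hp : p < tail.length) (hch : List.IsChain (pvStep d) (tail ++ [tail[p]]))
    (hnd : tail.Nodup) :
    ∀ (i : Nat) (hi : i < p), ¬ pvCyc d (tail[i]'(by omega)) := by
  intro i hi hcyc
  obtain ⟨k, hk1, hper, hcont⟩ := hcyc
  have hilen : i < tail.length := by omega
  by_cases hk : i + k ≤ tail.length
  · by_cases hk2 : i + k < tail.length
    · have := pv_chain_between d tail _ hch i (i + k) (by omega) hk2
      rw [show i + k - i = k by omega, hper] at this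
      have := (List.Nodup.getElem_inj_iff hnd).mp this.symm
      omega
    · have heq := pv_chain_last d tail _ hch i hilen
      rw [show tail.length - i = k by omega, hper] at heq
      have := (List.Nodup.getElem_inj_iff hnd).mp heq
      omega
  · have heq := pv_chain_last d tail _ hch i hilen
    have hx : (pvF d)^[k] (tail[i]'hilen)
        = (pvF d)^[k - (tail.length - i)] ((pvF d)^[tail.length - i] (tail[i]'hilen)) := by
      rw [← Function.iterate_add_apply]
      congr 1
      omega
    rw [heq] at hx
    have hmem : (pvF d)^[k - (tail.length - i)] (tail[p]'hp) ∈ tail.drop p :=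
      pv_loop_orbit d tail p hp hch _ _
        (List.mem_iff_getElem.mpr ⟨0, by rw [List.length_drop]; omega,
          by rw [List.getElem_drop]; norm_num⟩)
    rw [← hx, hper] at hmem
    obtain ⟨j, hj, hje⟩ := List.mem_iff_getElem.mp hmem
    rw [List.getElem_drop] at hje
    have := (List.Nodup.getElem_inj_iff hnd).mp hje
    omega

lemma pv_nocyc_of_exit (d : PySem.Dict String String) (tail : List String) (cur' : String)
    (hch : List.IsChain (pvStep d) (tail ++ [cur'])) (hc : d.contains cur' = false) :
    ∀ x ∈ tail, ¬ pvCyc d x := by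
  intro x hx hcyc
  obtain ⟨i, hi, hxe⟩ := List.mem_iff_getElem.mp hx
  obtain ⟨_, _, _, hcont⟩ := hcyc
  have := pv_chain_last d tail cur' hch i hi
  rw [hxe] at this
  rw [← this] at hc
  rw [hcont (tail.length - i)] at hc
  cases hc

lemma pv_nonstop_of_nocyc (d : PySem.Dict String String) (x : String)
    (h : ¬ pvCyc d x) : pvOnCycle d x x d.keys.length = false := by
  cases honc : pvOnCycle d x x d.keys.length with
  | false => rfl
  | true => exact absurd (pv_cyc_of_onc d x _ honc) h

-- nodes on a fresh nonstop chain into a GoodSeek node become GoodSeek once marked seen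
lemma pv_goodSeek_of_prefix (d : PySem.Dict String String) (seen cyc : PySem.Set String)
    (tail : List String) (s : String)
    (hch : List.IsChain (pvStep d) (tail ++ [s]))
    (hns : ∀ y ∈ tail, d.contains y = true ∧ pvOnCycle d y y d.keys.length = false)
    (hfresh : ∀ y ∈ tail, PySem.Set.contains seen y = false)
    (hnd : tail.Nodup)
    (hgs : pvGoodSeek d seen cyc s) :
    ∀ x ∈ tail, pvGoodSeek d (PySem.Set.update seen tail) cyc x := by
  intro x hx
  obtain ⟨i, hi, hxe⟩ := List.mem_iff_getElem.mp hx
  have hdi : tail.drop i = tail[i] :: tail.drop (i + 1) := List.drop_eq_getElem_cons hi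
  have hchi : List.IsChain (pvStep d) ((tail[i] :: tail.drop (i + 1)) ++ [s]) := by
    have h1 := List.IsChain.drop hch i
    rw [List.drop_append_of_le_length (by omega), hdi] at h1
    simpa using h1
  have hsubdrop : ∀ y ∈ tail[i] :: tail.drop (i + 1), y ∈ tail := by
    rw [← hdi]; exact fun y hy => List.drop_subset _ _ hy
  have hnddrop : (tail[i] :: tail.drop (i + 1)).Nodup := by
    rw [← hdi]; exact List.Nodup.sublist (List.drop_sublist _ _) hnd
  rcases hgs with ⟨hstop, hgood⟩ | ⟨pre_s, c_s, hch_s, hns_s, hseen_s, hnd_s, hstop, hgood⟩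
  · subst hxe
    refine Or.inr ⟨tail.drop (i + 1), s, hchi, fun y hy => hns y (hsubdrop y hy),
      fun y hy => ?_, hnddrop, hstop, hgood⟩
    rw [pv_contains_update]
    simp [hsubdrop y hy]
  · subst hxe
    have hglue : List.IsChain (pvStep d)
        ((tail[i] :: (tail.drop (i + 1) ++ s :: pre_s)) ++ [c_s]) := by
      have hg := pv_chain_glue d (tail[i] :: tail.drop (i + 1)) s (pre_s ++ [c_s]) hchi
        (by simpa using hch_s)
      have heq : (tail[i] :: (tail.drop (i + 1) ++ s :: pre_s)) ++ [c_s]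
          = (tail[i] :: tail.drop (i + 1)) ++ s :: (pre_s ++ [c_s]) := by
        simp only [List.cons_append, List.append_assoc]
      rw [heq]; exact hg
    refine Or.inr ⟨tail.drop (i + 1) ++ s :: pre_s, c_s, hglue, ?_, ?_, ?_, hstop, hgood⟩
    · intro y hy
      rcases List.mem_cons.mp hy with h | h
      · exact hns y (hsubdrop y (h ▸ List.mem_cons_self))
      · rcases List.mem_append.mp h with h2 | h2
        · exact hns y (hsubdrop y (List.mem_cons_of_mem _ h2))
        · exact hns_s y h2
    · intro y hy
      rw [pv_contains_update]
      rcases List.mem_cons.mp hy with h | h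
      · simp [hsubdrop y (h ▸ List.mem_cons_self)]
      · rcases List.mem_append.mp h with h2 | h2
        · simp [hsubdrop y (List.mem_cons_of_mem _ h2)]
        · rw [hseen_s y h2]; rfl
    · rw [show (tail[i] :: (tail.drop (i + 1) ++ s :: pre_s))
          = (tail[i] :: tail.drop (i + 1)) ++ (s :: pre_s) from by
        simp only [List.cons_append]]
      refine List.Nodup.append hnddrop hnd_s ?_
      intro a ha hb
      have h1 := hfresh a (hsubdrop a ha)
      have h2 := hseen_s a hb
      rw [h1] at h2; cases h2

-- the fold bodies of the two ports (definitionally equal to the ports' lambdas)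
def pvStepA (d : PySem.Dict String String) (st : PySem.Set String × PySem.Set String)
    (start : String) : PySem.Set String × PySem.Set String :=
  if PySem.Set.contains st.2 start then st
  else
    let r := pvWalkA d st.1 st.2 PySem.Dict.empty [] start (d.keys.length + 1)
    (r.1, PySem.Set.update st.2 r.2)

def pvStepB (d : PySem.Dict String String) (cy : PySem.Set String) (start : String) :
    PySem.Set String :=
  let cur := pvSeekB d d.keys.length start (d.keys.length + 1)
  if d.contains cur && !(PySem.Set.contains cy cur) then
    pvEmitB d cur cy cur (d.keys.length + 1)
  else cy

-- the two outer loops, key by key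
lemma pv_outer (d : PySem.Dict String String) :
    ∀ (rest : List String) (cyc seen : PySem.Set String),
    (∀ x ∈ cyc, PySem.Set.contains seen x = true) →
    (∀ s, PySem.Set.contains seen s = true → pvCyc d s → s ∈ cyc) →
    (∀ c ∈ cyc, ∀ j, (pvF d)^[j] c ∈ cyc) →
    (∀ x, PySem.Set.contains seen x = true → pvGoodSeek d seen cyc x) →
    (rest.foldl (pvStepA d) (cyc, seen)).1 = rest.foldl (pvStepB d) cyc := by
  intro rest
  induction rest with
  | nil => intro cyc seen _ _ _ _; rfl
  | cons start rest ih =>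
    intro cyc seen I1 I2 I3 I4
    simp only [List.foldl_cons]
    cases hs : PySem.Set.contains seen start with
    | true =>
      have hA : pvStepA d (cyc, seen) start = (cyc, seen) := by
        unfold pvStepA
        rw [if_pos (show PySem.Set.contains (cyc, seen).2 start = true from hs)]
      have hB : pvStepB d cyc start = cyc := pv_no_emit d cyc seen start (I4 start hs)
      rw [hA, hB]
      exact ih cyc seen I1 I2 I3 I4
    | false =>
      obtain ⟨tail, cur', ext, hext, hch, hnd, hkeys, hfresh, hout⟩ :=
        pv_walkA_spec d (d.keys.length + 1) cyc seen PySem.Dict.empty [] start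
          (fun x => by rw [PySem.Dict.get?_empty]; simp [PySem.List.index?])
          (by simp)
          List.nodup_nil (fun x h => absurd h (List.not_mem_nil))
          (fun x h => absurd h (List.not_mem_nil))
          (lt_of_le_of_lt (List.length_filter_le _ _) (Nat.lt_succ_self _))
      simp only [List.nil_append] at hext hch hnd hkeys hout
      have htl0 : ∀ (h : 0 < tail.length), tail[0] = start := by
        intro h
        have he := congrArg (fun l => l[0]?) hext
        simp only [List.getElem?_append_left h, List.getElem?_cons_zero] at he
        rw [List.getElem?_eq_getElem h] at he
        exact Option.some_injective _ he
      have htlen : tail.length ≤ d.keys.length := pv_nodup_keys_len d tail hnd hkeys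
      have hIupd1 : ∀ y, PySem.Set.contains seen y = true
          → PySem.Set.contains (PySem.Set.update seen tail) y = true := by
        intro y hy; rw [pv_contains_update, hy]; rfl
      have hIupd2 : ∀ y ∈ tail, PySem.Set.contains (PySem.Set.update seen tail) y = true := by
        intro y hy; rw [pv_contains_update]; simp [hy]
      have hsplitSeen : ∀ y, PySem.Set.contains (PySem.Set.update seen tail) y = true
          → PySem.Set.contains seen y = true ∨ y ∈ tail := by
        intro y hy
        rw [pv_contains_update] at hy
        rcases Bool.or_eq_true_iff.mp hy with h | h
        · exact Or.inl h
        · exact Or.inr (of_decide_eq_true h)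
      rcases hout with ⟨hcur, hA⟩ | ⟨hcur, hcs, hA⟩ | ⟨p, hidx, hA⟩
      · -- the walk left the keys at cur': neither side emits
        have hnc : ∀ x ∈ tail, ¬ pvCyc d x := pv_nocyc_of_exit d tail cur' hch hcur
        have hns : ∀ y ∈ tail, d.contains y = true ∧ pvOnCycle d y y d.keys.length = false :=
          fun y hy => ⟨hkeys y hy, pv_nonstop_of_nocyc d y (hnc y hy)⟩
        have hgs_stop : pvGoodSeek d seen cyc cur' := Or.inl ⟨Or.inl hcur, Or.inl hcur⟩
        have hGS := pv_goodSeek_of_prefix d seen cyc tail cur' hch hns hfresh hnd hgs_stop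
        have hgs_start : pvGoodSeek d (PySem.Set.update seen tail) cyc start := by
          cases tail with
          | nil =>
            have hcs' : cur' = start := ((List.cons_eq_cons).mp (by simpa using hext)).1
            exact hcs' ▸ pv_goodSeek_mono d seen _ cyc cyc _ hIupd1 (fun y hy => hy) hgs_stop
          | cons a t =>
            have h0 : (a :: t)[0] = start := htl0 (by simp)
            have hg := hGS ((a :: t)[0]'(by simp)) (List.getElem_mem _)
            rwa [h0] at hg
        have hAstep : pvStepA d (cyc, seen) start = (cyc, PySem.Set.update seen tail) := by
          simp only [pvStepA, hs, Bool.false_eq_true, if_false]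
          rw [hA]
        have hBstep : pvStepB d cyc start = cyc :=
          pv_no_emit d cyc (PySem.Set.update seen tail) start hgs_start
        rw [hAstep, hBstep]
        refine ih cyc (PySem.Set.update seen tail) (fun x hx => hIupd1 x (I1 x hx)) ?_ I3 ?_
        · intro s' hs' hcyc
          rcases hsplitSeen s' hs' with h | h
          · exact I2 s' h hcyc
          · exact absurd hcyc (hnc s' h)
        · intro x hx
          rcases hsplitSeen x hx with h | h
          · exact pv_goodSeek_mono d seen _ cyc cyc x hIupd1 (fun y hy => hy) (I4 x h)
          · exact hGS x h
      · -- the walk hit an already finished node cur': neither side emits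
        have htne : tail ≠ [] := by
          intro h
          subst h
          have hcs' : cur' = start := ((List.cons_eq_cons).mp (by simpa using hext)).1
          rw [hcs', hs] at hcs; cases hcs
        have hnc : ∀ x ∈ tail, ¬ pvCyc d x := by
          intro x hx hcyc
          obtain ⟨i, hi, hxe⟩ := List.mem_iff_getElem.mp hx
          have hsx : (pvF d)^[tail.length - i] x = cur' := by
            rw [← hxe]; exact pv_chain_last d tail cur' hch i hi
          have hcycs : pvCyc d cur' := by
            rw [← hsx]; exact pv_cyc_shift d x _ hcyc
          have hscyc : cur' ∈ cyc := I2 cur' hcs hcycs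
          obtain ⟨m', hm'⟩ := pv_cyc_back d x (tail.length - i) hcyc
          rw [hsx] at hm'
          have hxc : x ∈ cyc := by rw [← hm']; exact I3 cur' hscyc m'
          have := I1 x hxc
          rw [hfresh x hx] at this; cases this
        have hns : ∀ y ∈ tail, d.contains y = true ∧ pvOnCycle d y y d.keys.length = false :=
          fun y hy => ⟨hkeys y hy, pv_nonstop_of_nocyc d y (hnc y hy)⟩
        have hGS := pv_goodSeek_of_prefix d seen cyc tail cur' hch hns hfresh hnd (I4 cur' hcs)
        have hgs_start : pvGoodSeek d (PySem.Set.update seen tail) cyc start := by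
          cases tail with
          | nil => exact absurd rfl htne
          | cons a t =>
            have h0 : (a :: t)[0] = start := htl0 (by simp)
            have hg := hGS ((a :: t)[0]'(by simp)) (List.getElem_mem _)
            rwa [h0] at hg
        have hAstep : pvStepA d (cyc, seen) start = (cyc, PySem.Set.update seen tail) := by
          simp only [pvStepA, hs, Bool.false_eq_true, if_false]
          rw [hA]
        have hBstep : pvStepB d cyc start = cyc :=
          pv_no_emit d cyc (PySem.Set.update seen tail) start hgs_start
        rw [hAstep, hBstep]
        refine ih cyc (PySem.Set.update seen tail) (fun x hx => hIupd1 x (I1 x hx)) ?_ I3 ?_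
        · intro s' hs' hcyc
          rcases hsplitSeen s' hs' with h | h
          · exact I2 s' h hcyc
          · exact absurd hcyc (hnc s' h)
        · intro x hx
          rcases hsplitSeen x hx with h | h
          · exact pv_goodSeek_mono d seen _ cyc cyc x hIupd1 (fun y hy => hy) (I4 x h)
          · exact hGS x h
      · -- the walk ran into its own path: A slices order[p:], B walks the cycle once
        obtain ⟨hp, hpe, -⟩ := PySem.List.getElem_of_index?_eq_some hidx
        have hchl : List.IsChain (pvStep d) (tail ++ [tail[p]]) := by rw [hpe]; exact hch
        have hloopcyc := pv_loop_cyc d tail p hp hchl hkeys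
        have horbit := pv_loop_orbit d tail p hp hchl
        have hpre := pv_prefix_nocyc_of_loop d tail p hp hchl hnd
        have hmemp : tail[p] ∈ tail.drop p :=
          List.mem_iff_getElem.mpr ⟨0, by rw [List.length_drop]; omega,
            by rw [List.getElem_drop]; norm_num⟩
        have honcp : pvOnCycle d (tail[p]'hp) (tail[p]'hp) d.keys.length = true :=
          pv_onc_of_cyc d _ (hloopcyc _ hmemp)
        -- the nonstop prefix of the seek is tail.take p
        have htake : tail.take p ++ [tail[p]'hp] = tail.take (p + 1) := by
          rw [List.take_add_one, List.getElem?_eq_getElem hp]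
          rfl
        have hchtake : List.IsChain (pvStep d) (tail.take p ++ [tail[p]'hp]) := by
          rw [htake]
          have := List.IsChain.take hch (p + 1)
          rwa [List.take_append_of_le_length (by omega)] at this
        have hnstake : ∀ y ∈ tail.take p,
            d.contains y = true ∧ pvOnCycle d y y d.keys.length = false := by
          intro y hy
          obtain ⟨i, hi, hye⟩ := List.mem_iff_getElem.mp hy
          rw [List.getElem_take] at hye
          have hiP : i < p := by rw [List.length_take] at hi; omega
          refine ⟨hkeys y (List.take_subset _ _ hy), ?_⟩
          rw [← hye]
          exact pv_nonstop_of_nocyc d _ (hpre i hiP)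
        have hhd : (tail.take p).headD (tail[p]'hp) = start := by
          cases tail with
          | nil => simp at hp
          | cons a t =>
            have h0 := htl0 (by simp)
            cases p with
            | zero => simpa using h0
            | succ q => simpa using h0
        have hseek : pvSeekB d d.keys.length start (d.keys.length + 1) = tail[p]'hp := by
          have hlen : (tail.take p).length < d.keys.length + 1 := by
            rw [List.length_take]; omega
          have hse := pv_seek_eval d d.keys.length (tail.take p) (tail[p]'hp)
            (d.keys.length + 1) hlen hchtake hnstake (Or.inr honcp)
          rwa [hhd] at hse
        have hmemtailp : (tail[p]'hp) ∈ tail := List.getElem_mem hp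
        have hcontp : d.contains (tail[p]'hp) = true := hkeys _ hmemtailp
        have hnotincyc : (tail[p]'hp) ∉ cyc := fun hmem => by
          have h1 := I1 _ hmem
          rw [hfresh _ hmemtailp] at h1; cases h1
        have hguard : (d.contains (tail[p]'hp) && !(PySem.Set.contains cyc (tail[p]'hp))) = true := by
          rw [hcontp]
          have hcc : PySem.Set.contains cyc (tail[p]'hp) = false := by
            cases hcc : PySem.Set.contains cyc (tail[p]'hp)
            · rfl
            · exact absurd ((pv_set_contains_iff _ _).mp hcc) hnotincyc
          rw [hcc]; rfl
        have hdropp : tail.drop p = (tail[p]'hp) :: tail.drop (p + 1) := List.drop_eq_getElem_cons hp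
        have hchdrop : List.IsChain (pvStep d)
            ((tail[p]'hp) :: (tail.drop (p + 1) ++ [tail[p]'hp])) := by
          have h1 := List.IsChain.drop hchl p
          rw [List.drop_append_of_le_length (by omega)] at h1
          have heq : (tail[p]'hp) :: (tail.drop (p + 1) ++ [tail[p]'hp])
              = tail.drop p ++ [tail[p]'hp] := by
            rw [hdropp]; simp only [List.cons_append]
          rw [heq]; exact h1
        have hnotin : (tail[p]'hp) ∉ tail.drop (p + 1) := by
          intro hmem
          obtain ⟨j, hj, hje⟩ := List.mem_iff_getElem.mp hmem
          rw [List.getElem_drop] at hje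
          have := (List.Nodup.getElem_inj_iff hnd).mp hje
          omega
        have hemit : pvEmitB d (tail[p]'hp) cyc (tail[p]'hp) (d.keys.length + 1)
            = List.foldl PySem.Set.add cyc ((tail[p]'hp) :: tail.drop (p + 1)) := by
          refine pvEmit_eq d _ (tail.drop (p + 1)) _ cyc _ ?_ hchdrop hnotin
          rw [List.length_drop]; omega
        have hupd : PySem.Set.update cyc (tail.drop p)
            = List.foldl PySem.Set.add cyc ((tail[p]'hp) :: tail.drop (p + 1)) := by
          rw [hdropp]; rfl
        have hAstep : pvStepA d (cyc, seen) start
            = (PySem.Set.update cyc (tail.drop p), PySem.Set.update seen tail) := by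
          unfold pvStepA
          rw [if_neg (by rw [hs]; exact Bool.false_ne_true)]
          rw [hA]
        have hBstep : pvStepB d cyc start = PySem.Set.update cyc (tail.drop p) := by
          show (if d.contains (pvSeekB d d.keys.length start (d.keys.length + 1))
              && !(PySem.Set.contains cyc (pvSeekB d d.keys.length start (d.keys.length + 1))) then
            pvEmitB d (pvSeekB d d.keys.length start (d.keys.length + 1)) cyc
              (pvSeekB d d.keys.length start (d.keys.length + 1)) (d.keys.length + 1)
          else cyc) = PySem.Set.update cyc (tail.drop p)
          rw [hseek, if_pos hguard, hemit, hupd]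
        rw [hAstep, hBstep]
        have hCycSub : ∀ y ∈ cyc, y ∈ PySem.Set.update cyc (tail.drop p) :=
          fun y hy => (PySem.Set.mem_update _ _ _).mpr (Or.inl hy)
        have hDropSub : ∀ y ∈ tail.drop p, y ∈ PySem.Set.update cyc (tail.drop p) :=
          fun y hy => (PySem.Set.mem_update _ _ _).mpr (Or.inr hy)
        refine ih (PySem.Set.update cyc (tail.drop p)) (PySem.Set.update seen tail) ?_ ?_ ?_ ?_
        · intro x hx
          rcases (PySem.Set.mem_update _ _ _).mp hx with h | h
          · exact hIupd1 x (I1 x h)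
          · exact hIupd2 x (List.drop_subset _ _ h)
        · intro s' hs' hcyc
          rcases hsplitSeen s' hs' with h | h
          · exact hCycSub s' (I2 s' h hcyc)
          · obtain ⟨i, hi, hxe⟩ := List.mem_iff_getElem.mp h
            by_cases hiP : i < p
            · rw [← hxe] at hcyc
              exact absurd hcyc (hpre i hiP)
            · refine hDropSub s' ?_
              rw [List.mem_iff_getElem?]
              refine ⟨i - p, ?_⟩
              rw [List.getElem?_drop, show p + (i - p) = i from by omega,
                List.getElem?_eq_getElem hi, hxe]
        · intro c hc j
          rcases (PySem.Set.mem_update _ _ _).mp hc with h | h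
          · exact hCycSub _ (I3 c h j)
          · exact hDropSub _ (horbit j c h)
        · intro x hx
          rcases hsplitSeen x hx with h | h
          · exact pv_goodSeek_mono d seen _ cyc _ x hIupd1 hCycSub (I4 x h)
          · obtain ⟨i, hi, hxe⟩ := List.mem_iff_getElem.mp h
            by_cases hiP : i < p
            · -- x sits on the nonstop prefix of the discovered cycle
              have hxtake : x ∈ tail.take p := by
                rw [List.mem_iff_getElem]
                exact ⟨i, by rw [List.length_take]; omega, by rw [List.getElem_take]; exact hxe⟩
              have hgs_e : pvGoodSeek d seen (PySem.Set.update cyc (tail.drop p)) (tail[p]'hp) :=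
                Or.inl ⟨Or.inr honcp, Or.inr (hDropSub _ hmemp)⟩
              have hg := pv_goodSeek_of_prefix d seen (PySem.Set.update cyc (tail.drop p))
                (tail.take p) (tail[p]'hp) hchtake hnstake
                (fun y hy => hfresh y (List.take_subset _ _ hy))
                (List.Nodup.sublist (List.take_sublist _ _) hnd) hgs_e x hxtake
              refine pv_goodSeek_mono d _ _ _ _ x ?_ (fun y hy => hy) hg
              intro y hy
              rw [pv_contains_update] at hy
              rw [pv_contains_update]
              rcases Bool.or_eq_true_iff.mp hy with h2 | h2
              · rw [h2]; rfl
              · have : y ∈ tail := List.take_subset _ _ (of_decide_eq_true h2)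
                simp [this]
            · -- x is on the emitted cycle itself
              have hxdrop : x ∈ tail.drop p := by
                rw [List.mem_iff_getElem?]
                refine ⟨i - p, ?_⟩
                rw [List.getElem?_drop, show p + (i - p) = i from by omega,
                  List.getElem?_eq_getElem hi, hxe]
              exact Or.inl ⟨Or.inr (by rw [← hxe] at hxdrop ⊢; exact pv_onc_of_cyc d _ (hloopcyc _ hxdrop)),
                Or.inr (hDropSub _ hxdrop)⟩

-- ===== VERDICT (by name: the statement is the Claim_ definition above) =====
theorem find_supersedes_cycle_nodes_spec : Claim_equal_find_supersedes_cycle_nodes := by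
  intro l _dom
  unfold Spec_find_supersedes_cycle_nodes find_supersedes_cycle_nodes find_supersedes_cycle_nodes_alt
  exact pv_outer (PySem.Dict.ofList l) (PySem.Dict.ofList l).keys PySem.Set.empty PySem.Set.empty
    (fun x hx => absurd hx List.not_mem_nil)
    (fun s hs _ => absurd ((pv_set_contains_iff _ _).mp hs) List.not_mem_nil)
    (fun c hc _ => absurd hc List.not_mem_nil)
    (fun x hx => absurd ((pv_set_contains_iff _ _).mp hx) List.not_mem_nil)
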